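-- pv_equiv track=rewrite | github.com/ErfanDavoodiNasr/estjt-gold-api | app/scraper.py | _looks_like_block_page
-- ===== SOURCE A (Python) =====
-- def _looks_like_block_page(html: str) -> bool:
--     body = html.lower()
--     patterns = [
--         "captcha",
--         "cloudflare",
--         "access denied",
--         "security check",
--         "attention required",
--     ]
--     return any(pattern in body for pattern in patterns)
-- ===== SOURCE B (Python) =====
-- _PATTERNS = (
--     "captcha",
--     "cloudflare",
--     "access denied",
--     "security check",
--     "attention required",
-- )
--
-- def _looks_like_block_page(html: str) -> bool:
--     body = html.lower()
--     for i in range(len(body)):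
--         if any(body.startswith(p, i) for p in _PATTERNS):
--             return True
--     return False
-- ===== Notes on version B (the rewrite author's own statement) =====
-- stated objective: alternative
-- what changed: Replaces the five independent full-text substring-containment searches with a single left-to-right scan that tests all patterns at each position of the lowered text.
import Mathlib
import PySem

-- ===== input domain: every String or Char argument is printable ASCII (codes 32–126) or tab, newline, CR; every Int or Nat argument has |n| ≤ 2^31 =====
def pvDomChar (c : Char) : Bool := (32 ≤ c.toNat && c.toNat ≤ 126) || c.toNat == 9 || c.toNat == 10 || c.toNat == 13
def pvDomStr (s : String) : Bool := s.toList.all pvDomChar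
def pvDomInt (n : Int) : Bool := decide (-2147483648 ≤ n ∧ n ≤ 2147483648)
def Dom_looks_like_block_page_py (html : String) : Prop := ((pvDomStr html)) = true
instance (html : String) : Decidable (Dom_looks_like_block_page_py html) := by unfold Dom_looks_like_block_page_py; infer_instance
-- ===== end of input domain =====

-- B replaces A's five independent full-text substring searches by one left-to-right scan
-- testing all patterns at each position (alternative decomposition, same result).

-- ===== PORT A =====
-- the five literal patterns, as in the Python
def blockPatterns : List String :=
  ["captcha", "cloudflare", "access denied", "security check", "attention required"]

def looks_like_block_page_py (html : String) : Bool :=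
  let body := PySem.Str.lower html
  blockPatterns.any (fun pattern => PySem.Str.isIn pattern body)

-- ===== PORT B =====
-- patterns as char lists (Source B's _PATTERNS)
def blockPatternsAlt : List (List Char) :=
  ["captcha".toList, "cloudflare".toList, "access denied".toList,
   "security check".toList, "attention required".toList]

-- the loop of Source B: at each position i (i.e. each suffix of body), test whether
-- some pattern starts there (body.startswith(p, i)); return True on first hit
def scanBlock : List Char → Bool
  | [] => false
  | c :: rest => blockPatternsAlt.any (fun p => p.isPrefixOf (c :: rest)) || scanBlock rest

def looks_like_block_page_py_alt (html : String) : Bool :=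
  scanBlock (PySem.Str.lower html).toList

-- ===== PRECONDITION & SPEC =====
def Spec_looks_like_block_page_py (html : String) (out : Bool) : Prop := out = looks_like_block_page_py_alt html
instance (html : String) (out : Bool) : Decidable (Spec_looks_like_block_page_py html out) := by unfold Spec_looks_like_block_page_py; infer_instance

-- ===== CLAIM (what is proved, stated in full; the proofs are below) =====
def Claim_equal_looks_like_block_page_py : Prop := ∀ (html : String), Dom_looks_like_block_page_py html → Spec_looks_like_block_page_py html (looks_like_block_page_py html)

-- ===== LEMMAS AND PROOFS =====

theorem scanBlock_iff (s : List Char) :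
    scanBlock s = true ↔ ∃ p ∈ blockPatternsAlt, p <:+: s := by
  induction s with
  | nil =>
    simp [scanBlock, blockPatternsAlt]
  | cons c rest ih =>
    simp only [scanBlock, Bool.or_eq_true, List.any_eq_true, ih, List.infix_cons_iff,
      List.isPrefixOf_iff_prefix]
    constructor
    · rintro (⟨p, hp, h⟩ | ⟨p, hp, h⟩) <;> exact ⟨p, hp, by tauto⟩
    · rintro ⟨p, hp, h | h⟩
      · exact Or.inl ⟨p, hp, h⟩
      · exact Or.inr ⟨p, hp, h⟩

theorem patterns_map : blockPatternsAlt = blockPatterns.map String.toList := by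
  decide

-- ===== VERDICT (by name: the statement is the Claim_ definition above) =====
theorem looks_like_block_page_py_spec : Claim_equal_looks_like_block_page_py := by
  intro html _
  unfold Spec_looks_like_block_page_py looks_like_block_page_py looks_like_block_page_py_alt
  rw [Bool.eq_iff_iff, scanBlock_iff, patterns_map]
  simp only [List.any_eq_true, List.mem_map, PySem.Str.isIn_iff_infix]
  constructor
  · rintro ⟨p, hp, h⟩; exact ⟨p.toList, ⟨p, hp, rfl⟩, h⟩
  · rintro ⟨_, ⟨p, hp, rfl⟩, h⟩; exact ⟨p, hp, h⟩
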